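-- pv_equiv track=rewrite | github.com/teamnxtone-stack/NXT1 | backend/routes/autofix.py | _select_files_for_fix
-- ===== SOURCE A (Python) =====
-- from typing import Optional, List, Dict
--
-- def _select_files_for_fix(files: list, hint_paths: Optional[list] = None,
--                           backend_first: bool = True, max_files: int = 14) -> list:
--     """Selective retrieval: prioritise files matching hint_paths and backend/."""
--     if not files:
--         return []
--     hint_paths = hint_paths or []
--     scored = []
--     for f in files:
--         score = 0
--         if any(h in f["path"] for h in hint_paths):
--             score += 10
--         if backend_first and f["path"].startswith("backend/"):
--             score += 3
--         if f["path"] in (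
--             "package.json", "vercel.json", "netlify.toml", "Dockerfile",
--             "backend/requirements.txt", "backend/server.py", "backend/server.js",
--             "requirements.txt"):
--             score += 5
--         scored.append((score, f))
--     scored.sort(key=lambda x: -x[0])
--     return [f for _, f in scored[:max_files]]
-- ===== SOURCE B (Python) =====
-- def _select_files_for_fix(files, hint_paths=None, backend_first=True, max_files=14):
--     if not files:
--         return []
--     hints = hint_paths or []
--     special = {"package.json", "vercel.json", "netlify.toml", "Dockerfile",
--                "backend/requirements.txt", "backend/server.py", "backend/server.js",
--                "requirements.txt"}
--     buckets = {}
--     for f in files: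
--         path = f["path"]
--         score = 0
--         if any(h in path for h in hints):
--             score += 10
--         if backend_first and path.startswith("backend/"):
--             score += 3
--         if path in special:
--             score += 5
--         buckets.setdefault(score, []).append(f)
--     result = []
--     for s in (18, 15, 13, 10, 8, 5, 3, 0):
--         result.extend(buckets.get(s, ()))
--     return result[:max_files]
-- ===== Notes on version B (the rewrite author's own statement) =====
-- stated objective: alternative
-- what changed: Replaces A's build-pairs-then-comparison-sort selection by a single pass that appends each file into a dict bucket keyed by its integer score, then concatenates the buckets over the fixed descending score values (18,15,13,10,8,5,3,0) and slices; no sort is performed (O(n) bucketing vs O(n log n) sort, not measurable in a timing run on this input family).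
import Mathlib
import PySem

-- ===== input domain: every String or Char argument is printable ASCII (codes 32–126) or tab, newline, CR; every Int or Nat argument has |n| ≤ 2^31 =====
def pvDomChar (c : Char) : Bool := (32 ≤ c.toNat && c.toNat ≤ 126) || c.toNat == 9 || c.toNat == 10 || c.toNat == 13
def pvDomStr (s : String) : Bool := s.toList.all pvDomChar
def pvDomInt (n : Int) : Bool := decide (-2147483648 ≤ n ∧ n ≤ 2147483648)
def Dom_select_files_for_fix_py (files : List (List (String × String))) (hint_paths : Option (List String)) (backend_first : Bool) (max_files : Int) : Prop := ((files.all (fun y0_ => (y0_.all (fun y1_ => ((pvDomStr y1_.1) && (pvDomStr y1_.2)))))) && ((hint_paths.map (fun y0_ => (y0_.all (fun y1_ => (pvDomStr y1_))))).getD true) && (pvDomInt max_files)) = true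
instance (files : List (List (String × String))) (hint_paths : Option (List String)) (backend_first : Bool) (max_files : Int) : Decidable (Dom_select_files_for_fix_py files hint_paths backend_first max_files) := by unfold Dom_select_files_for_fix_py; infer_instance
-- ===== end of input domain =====

-- B replaces A's comparison sort of (score, file) pairs by a single-pass score-keyed
-- bucket dict concatenated over the fixed descending score values (same selection, no sort).

-- ===== PORT A =====
-- f["path"]: first-match lookup in the association list; the "" default is only
-- reachable outside Pre_ (Python raises KeyError when "path" is missing).
def pvPath (f : List (String × String)) : String :=
  ((f.find? (fun kv => kv.1 == "path")).map (fun kv => kv.2)).getD ""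

-- the score accumulation of A's loop body, step for step
def pvScore (hints : List String) (backend_first : Bool) (path : String) : Int :=
  let s0 : Int := 0
  let s1 := if hints.any (fun h => PySem.Str.isIn h path) then s0 + 10 else s0
  let s2 := if backend_first && PySem.Str.startswith path "backend/" then s1 + 3 else s1
  if (path == "package.json" || path == "vercel.json" || path == "netlify.toml" ||
      path == "Dockerfile" || path == "backend/requirements.txt" ||
      path == "backend/server.py" || path == "backend/server.js" ||
      path == "requirements.txt") then s2 + 5 else s2

def select_files_for_fix_py (files : List (List (String × String))) (hint_paths : Option (List String)) (backend_first : Bool) (max_files : Int) : List (List (String × String)) :=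
  if files.isEmpty then []
  else
    let hints := hint_paths.getD []   -- `hint_paths or []` (None and [] both give [])
    let scored := files.foldl
      (fun acc f => acc ++ [(pvScore hints backend_first (pvPath f), f)]) []
    let sortd := PySem.List.sorted scored (fun x => -x.1)
    (PySem.List.slice sortd none (some max_files)).map (fun x => x.2)

-- ===== PORT B =====
-- Source B's `special` set literal
def pvSpecial : PySem.Set String :=
  PySem.Set.ofList ["package.json", "vercel.json", "netlify.toml", "Dockerfile",
    "backend/requirements.txt", "backend/server.py", "backend/server.js",
    "requirements.txt"]

-- the score accumulation of B's loop body (membership test against the set literal)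
def pvScoreB (hints : List String) (backend_first : Bool) (path : String) : Int :=
  let s0 : Int := 0
  let s1 := if hints.any (fun h => PySem.Str.isIn h path) then s0 + 10 else s0
  let s2 := if backend_first && PySem.Str.startswith path "backend/" then s1 + 3 else s1
  if PySem.Set.contains pvSpecial path then s2 + 5 else s2

-- Source B's fixed tuple of descending score values
def pvScoresDesc : List Int := [18, 15, 13, 10, 8, 5, 3, 0]

def select_files_for_fix_py_alt (files : List (List (String × String))) (hint_paths : Option (List String)) (backend_first : Bool) (max_files : Int) : List (List (String × String)) :=
  if files.isEmpty then []
  else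
    let hints := hint_paths.getD []
    let buckets := files.foldl
      (fun d f =>
        let sc := pvScoreB hints backend_first (pvPath f)
        d.insert sc (d.getD sc [] ++ [f]))
      (PySem.Dict.empty : PySem.Dict Int (List (List (String × String))))
    let result := pvScoresDesc.foldl (fun r s => r ++ buckets.getD s []) []
    PySem.List.slice result none (some max_files)

-- ===== PRECONDITION & SPEC =====
-- Pre_ excludes exactly the inputs where some file dict has no "path" key: there
-- Python A (and B) raise KeyError and return nothing.
def Pre_select_files_for_fix_py (files : List (List (String × String))) (hint_paths : Option (List String)) (backend_first : Bool) (max_files : Int) : Prop :=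
  files.all (fun f => f.any (fun kv => kv.1 == "path")) = true
instance (files : List (List (String × String))) (hint_paths : Option (List String)) (backend_first : Bool) (max_files : Int) : Decidable (Pre_select_files_for_fix_py files hint_paths backend_first max_files) := by unfold Pre_select_files_for_fix_py; infer_instance

def pvWitness_select_files_for_fix_py : (List (List (String × String))) × Option (List String) × Bool × Int :=
  ([[("path", "backend/app.py")], [("path", "package.json")], [("path", "README.md")]],
   some ["app"], true, 2)

def Spec_select_files_for_fix_py (files : List (List (String × String))) (hint_paths : Option (List String)) (backend_first : Bool) (max_files : Int) (out : List (List (String × String))) : Prop := out = select_files_for_fix_py_alt files hint_paths backend_first max_files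
instance (files : List (List (String × String))) (hint_paths : Option (List String)) (backend_first : Bool) (max_files : Int) (out : List (List (String × String))) : Decidable (Spec_select_files_for_fix_py files hint_paths backend_first max_files out) := by unfold Spec_select_files_for_fix_py; infer_instance

-- ===== CLAIM (what is proved, stated in full; the proofs are below) =====
def Claim_equal_select_files_for_fix_py : Prop := ∀ (files : List (List (String × String))) (hint_paths : Option (List String)) (backend_first : Bool) (max_files : Int), Dom_select_files_for_fix_py files hint_paths backend_first max_files → Pre_select_files_for_fix_py files hint_paths backend_first max_files → Spec_select_files_for_fix_py files hint_paths backend_first max_files (select_files_for_fix_py files hint_paths backend_first max_files)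

-- ===== LEMMAS AND PROOFS =====
-- B's set-literal membership test computes A's tuple-membership chain
lemma contains_special (p : String) : PySem.Set.contains pvSpecial p =
    (p == "package.json" || p == "vercel.json" || p == "netlify.toml" ||
      p == "Dockerfile" || p == "backend/requirements.txt" ||
      p == "backend/server.py" || p == "backend/server.js" ||
      p == "requirements.txt") := by
  rw [Bool.eq_iff_iff]
  simp [pvSpecial, PySem.Set.mem_ofList]
  tauto

lemma scoreB_eq_score (hints : List String) (bf : Bool) (p : String) :
    pvScoreB hints bf p = pvScore hints bf p := by
  unfold pvScoreB pvScore
  rw [contains_special]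

-- the score only ever takes the eight values of pvScoresDesc
lemma neg_score_mem (hints : List String) (bf : Bool) (p : String) :
    -pvScore hints bf p ∈ pvScoresDesc.map (fun s => -s) := by
  unfold pvScore pvScoresDesc
  split_ifs <;> simp

-- insertBy passes over a prefix it does not go before
lemma insertBy_append_not {α : Type} (before : α → α → Bool) (x : α) (l1 l2 : List α)
    (h : ∀ y ∈ l1, before x y = false) :
    PySem.List.insertBy before x (l1 ++ l2) = l1 ++ PySem.List.insertBy before x l2 := by
  induction l1 with
  | nil => simp
  | cons y ys ih =>
    have hy := h y (by simp)
    simp [PySem.List.insertBy, hy, ih (fun z hz => h z (by simp [hz]))]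

-- insertBy stops at the head when it goes before everything
lemma insertBy_all_before {α : Type} (before : α → α → Bool) (x : α) (l : List α)
    (h : ∀ y ∈ l, before x y = true) :
    PySem.List.insertBy before x l = x :: l := by
  cases l with
  | nil => rfl
  | cons y ys => simp [PySem.List.insertBy, h y (by simp)]

-- inserting one element into a bucket concatenation appends it to its own bucket
lemma insertBy_flatMap {α : Type} (key : α → Int) (x : α) (S : List Int) (L : List α)
    (hS : S.Pairwise (· < ·)) (hx : key x ∈ S) :
    PySem.List.insertBy (fun a b => decide (key a < key b)) x
      (S.flatMap (fun s => L.filter (fun y => key y == s)))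
    = S.flatMap (fun s => L.filter (fun y => key y == s) ++ (if key x == s then [x] else [])) := by
  induction S with
  | nil => simp at hx
  | cons s S' ih =>
    have hlt : ∀ t ∈ S', s < t := (List.pairwise_cons.mp hS).1
    simp only [List.flatMap_cons]
    by_cases hxs : key x = s
    · rw [insertBy_append_not _ _ _ _ (by
        intro y hy
        have := (List.mem_filter.mp hy).2
        simp only [beq_iff_eq] at this
        simp [hxs, this])]
      rw [insertBy_all_before _ _ _ (by
        intro y hy
        obtain ⟨t, ht, hyt⟩ := List.mem_flatMap.mp hy
        have := (List.mem_filter.mp hyt).2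
        simp only [beq_iff_eq] at this
        simp [hxs, this]
        exact hlt t ht)]
      have hne : ∀ t ∈ S', ¬ (key x == t) = true := by
        intro t ht
        simp [hxs]
        exact ne_of_lt (hlt t ht)
      have hflat : List.flatMap (fun t => List.filter (fun y => key y == t) L ++ (if (key x == t) = true then [x] else [])) S'
          = List.flatMap (fun t => List.filter (fun y => key y == t) L) S' :=
        List.flatMap_congr (fun t ht => by rw [if_neg (hne t ht), List.append_nil])
      rw [hflat]
      simp [hxs]
    · have hx' : key x ∈ S' := by
        rcases List.mem_cons.mp hx with h | h
        · exact absurd h hxs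
        · exact h
      have hslt : s < key x := hlt _ hx'
      rw [insertBy_append_not _ _ _ _ (by
        intro y hy
        have := (List.mem_filter.mp hy).2
        simp only [beq_iff_eq] at this
        simp [this]
        omega)]
      rw [ih (List.pairwise_cons.mp hS).2 hx']
      have : ¬ (key x == s) = true := by simp [hxs]
      rw [if_neg this, List.append_nil]

-- a stable sort by an Int key is the concatenation of the key buckets in key order
lemma sorted_eq_buckets {α : Type} (key : α → Int) (L : List α) (S : List Int)
    (hS : S.Pairwise (· < ·)) (hmem : ∀ x ∈ L, key x ∈ S) :
    PySem.List.sorted L key = S.flatMap (fun s => L.filter (fun y => key y == s)) := by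
  induction L using List.reverseRecOn with
  | nil => rw [PySem.List.sorted_eq_foldl_insertBy]; simp
  | append_singleton L x ih =>
    rw [PySem.List.sorted_eq_foldl_insertBy, List.foldl_append, ← PySem.List.sorted_eq_foldl_insertBy]
    simp only [List.foldl_cons, List.foldl_nil]
    rw [ih (fun y hy => hmem y (by simp [hy]))]
    rw [insertBy_flatMap key x S L hS (hmem x (by simp))]
    apply List.flatMap_congr
    intro t _
    rw [List.filter_append]
    simp only [List.filter_cons, List.filter_nil]

-- B's dict fold indexes the files by score, preserving order inside each bucket
lemma buckets_getD (hints : List String) (bf : Bool) (xs : List (List (String × String)))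
    (d : PySem.Dict Int (List (List (String × String)))) (s : Int) :
    (xs.foldl (fun d f =>
        let sc := pvScoreB hints bf (pvPath f)
        d.insert sc (d.getD sc [] ++ [f])) d).getD s []
    = d.getD s [] ++ xs.filter (fun f => pvScoreB hints bf (pvPath f) == s) := by
  induction xs generalizing d with
  | nil => simp
  | cons f xs ih =>
    simp only [List.foldl_cons, List.filter_cons]
    rw [ih]
    by_cases h : s = pvScoreB hints bf (pvPath f)
    · simp [h]
    · simp [PySem.Dict.getD_insert, h, Ne.symm h, beq_iff_eq]

lemma empty_getD (s : Int) :
    (PySem.Dict.empty : PySem.Dict Int (List (List (String × String)))).getD s [] = [] := by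
  simp [PySem.Dict.getD, PySem.Dict.empty, PySem.Dict.get?]

-- xs[:m] commutes with map
lemma map_slice_to {α β : Type} (g : α → β) (xs : List α) (m : Int) :
    (PySem.List.slice xs none (some m)).map g = PySem.List.slice (xs.map g) none (some m) := by
  simp [PySem.List.slice, List.map_take]

-- ===== VERDICT (by name: the statement is the Claim_ definition above) =====
theorem select_files_for_fix_py_spec : Claim_equal_select_files_for_fix_py := by
  intro files hint_paths backend_first max_files _ _
  unfold Spec_select_files_for_fix_py select_files_for_fix_py select_files_for_fix_py_alt
  by_cases hem : files.isEmpty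
  · simp [hem]
  · simp only [hem, Bool.false_eq_true, if_false]
    rw [PySem.List.foldl_append_singleton_eq_map
      (fun f => (pvScore (hint_paths.getD []) backend_first (pvPath f), f)) files []]
    rw [PySem.List.foldl_append_eq_flatMap
      (fun s => (files.foldl (fun d f =>
        let sc := pvScoreB (hint_paths.getD []) backend_first (pvPath f)
        d.insert sc (d.getD sc [] ++ [f]))
        (PySem.Dict.empty : PySem.Dict Int (List (List (String × String))))).getD s []) pvScoresDesc []]
    simp only [List.nil_append]
    rw [sorted_eq_buckets (fun x : Int × List (String × String) => -x.1) _ (pvScoresDesc.map (fun s => -s))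
      (by unfold pvScoresDesc; decide)
      (by
        intro x hx
        obtain ⟨f, hf, rfl⟩ := List.mem_map.mp hx
        exact neg_score_mem _ _ _)]
    rw [map_slice_to]
    congr 1
    rw [List.map_flatMap, List.flatMap_map]
    have hbk : List.flatMap (fun s => (files.foldl (fun d f =>
        let sc := pvScoreB (hint_paths.getD []) backend_first (pvPath f)
        d.insert sc (d.getD sc [] ++ [f]))
        (PySem.Dict.empty : PySem.Dict Int (List (List (String × String))))).getD s []) pvScoresDesc
        = List.flatMap (fun s => files.filter (fun f => pvScore (hint_paths.getD []) backend_first (pvPath f) == s)) pvScoresDesc := by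
      apply List.flatMap_congr
      intro s _
      rw [buckets_getD, empty_getD, List.nil_append]
      simp [scoreB_eq_score]
    rw [hbk]
    apply List.flatMap_congr
    intro s _
    rw [List.filter_map]
    simp only [List.map_map]
    have hid : ((fun x : Int × List (String × String) => x.2) ∘
        (fun f => (pvScore (hint_paths.getD []) backend_first (pvPath f), f))) = id := rfl
    rw [hid, List.map_id]
    apply List.filter_congr
    intro f _
    simp only [Function.comp_apply]
    rw [Bool.eq_iff_iff]
    simp
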